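-- pv_equiv track=rewrite | github.com/Luca00casati/aoc | 2017/day15/main.py | judge_count
-- ===== SOURCE A (Python) =====
-- def judge_count(startA, startB, iterations=40000000):
--     factorA = 16807
--     factorB = 48271
--     modulus = 2147483647
--     mask = 0xFFFF  # To extract the lowest 16 bits
--     count = 0
--
--     valueA = startA
--     valueB = startB
--
--     for _ in range(iterations):
--         valueA = (valueA * factorA) % modulus
--         valueB = (valueB * factorB) % modulus
--         if (valueA & mask) == (valueB & mask):
--             count += 1
--
--     return count
-- ===== SOURCE B (Python) =====
-- def judge_count(startA, startB, iterations=40000000):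
--     # Divide and conquer: count matches in the first half from the current
--     # seeds, then JUMP both generator states over h steps at once with
--     # modular exponentiation (state after h steps = seed * factor**h mod M)
--     # and recurse on the second half (recursion depth is only log2(n)).
--     # Correct because x -> x*f % M composed h times is x -> x*f**h % M.
--     M = 2147483647
--     def cnt(a, b, n):
--         if n <= 0:
--             return 0
--         if n == 1:
--             a2 = a * 16807 % M
--             b2 = b * 48271 % M
--             return 1 if a2 & 0xFFFF == b2 & 0xFFFF else 0
--         h = n // 2
--         return cnt(a, b, h) + cnt(a * pow(16807, h, M) % M,
--                                   b * pow(48271, h, M) % M, n - h)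
--     return cnt(startA, startB, iterations)
-- ===== Notes on version B (the rewrite author's own statement) =====
-- stated objective: alternative
-- what changed: A's single fused loop over both generator states is replaced by a divide-and-conquer recursion that counts each half independently, jumping the two LCG states over the first half in one step with modular exponentiation (seed*factor**h mod M) instead of stepping through it.
import Mathlib
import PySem

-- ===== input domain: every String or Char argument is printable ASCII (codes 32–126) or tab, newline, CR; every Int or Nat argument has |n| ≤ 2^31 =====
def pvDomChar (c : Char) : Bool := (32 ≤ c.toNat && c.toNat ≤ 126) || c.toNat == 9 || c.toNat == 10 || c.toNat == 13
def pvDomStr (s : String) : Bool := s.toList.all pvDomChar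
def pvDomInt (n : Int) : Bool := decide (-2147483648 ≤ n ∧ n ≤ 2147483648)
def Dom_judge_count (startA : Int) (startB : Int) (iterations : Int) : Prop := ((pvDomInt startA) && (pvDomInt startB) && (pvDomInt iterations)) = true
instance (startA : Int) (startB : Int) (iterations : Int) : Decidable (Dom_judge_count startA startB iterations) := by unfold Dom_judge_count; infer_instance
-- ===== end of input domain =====

set_option maxHeartbeats 800000


-- B replaces A's fused linear loop by a divide-and-conquer recursion that jumps
-- both LCG states over each first half with modular exponentiation (objective: alternative).

-- ===== PORT A =====
-- one step of A's loop body over the state (valueA, valueB, count)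
def pvStepA (st : Int × Int × Int) : Int × Int × Int :=
  let vA := PySem.Int.mod (st.1 * 16807) 2147483647
  let vB := PySem.Int.mod (st.2.1 * 48271) 2147483647
  (vA, vB, if Int.land vA 0xFFFF = Int.land vB 0xFFFF then st.2.2 + 1 else st.2.2)

def judge_count (startA : Int) (startB : Int) (iterations : Int) : Int :=
  ((PySem.List.pyRange 0 iterations 1).foldl (fun st _ => pvStepA st)
    (startA, startB, (0 : Int))).2.2

-- ===== PORT B =====
-- the inner recursive cnt(a, b, n) of Source B; n is a Nat (cnt returns 0 for n <= 0,
-- which the Int.toNat conversion in judge_count_alt realises); pow(f, h, M) is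
-- ported as PySem.Int.mod (f ^ h) M
def pvCnt (a b : Int) (n : Nat) : Int :=
  if n = 0 then 0
  else if n = 1 then
    let a2 := PySem.Int.mod (a * 16807) 2147483647
    let b2 := PySem.Int.mod (b * 48271) 2147483647
    if Int.land a2 0xFFFF = Int.land b2 0xFFFF then 1 else 0
  else
    let h := n / 2
    pvCnt a b h +
      pvCnt (PySem.Int.mod (a * PySem.Int.mod ((16807 : Int) ^ h) 2147483647) 2147483647)
            (PySem.Int.mod (b * PySem.Int.mod ((48271 : Int) ^ h) 2147483647) 2147483647)
            (n - h)
termination_by n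
decreasing_by all_goals omega

def judge_count_alt (startA : Int) (startB : Int) (iterations : Int) : Int :=
  pvCnt startA startB iterations.toNat

-- ===== PRECONDITION & SPEC =====
def Spec_judge_count (startA : Int) (startB : Int) (iterations : Int) (out : Int) : Prop := out = judge_count_alt startA startB iterations
instance (startA : Int) (startB : Int) (iterations : Int) (out : Int) : Decidable (Spec_judge_count startA startB iterations out) := by unfold Spec_judge_count; infer_instance

-- ===== CLAIM (what is proved, stated in full; the proofs are below) =====
def Claim_equal_judge_count : Prop := ∀ (startA : Int) (startB : Int) (iterations : Int), Dom_judge_count startA startB iterations → Spec_judge_count startA startB iterations (judge_count startA startB iterations)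

-- ===== LEMMAS AND PROOFS =====

-- structural specification: number of matches in the next n steps from seeds (a, b)
def pvCntSpec (a b : Int) : Nat → Int
  | 0 => 0
  | n + 1 =>
    let a' := PySem.Int.mod (a * 16807) 2147483647
    let b' := PySem.Int.mod (b * 48271) 2147483647
    (if Int.land a' 0xFFFF = Int.land b' 0xFFFF then 1 else 0) + pvCntSpec a' b' n

-- the LCG state after n steps from seed a with factor f
def pvSt (a f : Int) : Nat → Int
  | 0 => a
  | n + 1 => PySem.Int.mod (pvSt a f n * f) 2147483647

theorem pv_mod_pos (x : Int) : PySem.Int.mod x 2147483647 = x % 2147483647 :=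
  PySem.Int.mod_eq_emod_of_pos (by norm_num)

theorem pv_mul_mod_left (x f : Int) :
    (x % 2147483647 * f) % 2147483647 = (x * f) % 2147483647 := by
  conv_lhs => rw [Int.mul_emod]
  conv_rhs => rw [Int.mul_emod]
  simp [Int.emod_emod_of_dvd]

theorem pv_mul_mod_right (a y : Int) :
    (a * (y % 2147483647)) % 2147483647 = (a * y) % 2147483647 := by
  conv_lhs => rw [Int.mul_emod]
  conv_rhs => rw [Int.mul_emod]
  simp [Int.emod_emod_of_dvd]

-- state shift: one explicit step, then n steps
theorem pvSt_shift (a f : Int) : ∀ n : Nat,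
    pvSt a f (n + 1) = pvSt (PySem.Int.mod (a * f) 2147483647) f n := by
  intro n
  induction n with
  | zero => simp [pvSt]
  | succ n ih => rw [show n + 1 + 1 = (n + 1) + 1 from rfl, pvSt, ih, pvSt]

-- closed form for the state after n ≥ 1 steps
theorem pvSt_pow (a f : Int) : ∀ n : Nat, 1 ≤ n →
    pvSt a f n = PySem.Int.mod (a * f ^ n) 2147483647 := by
  intro n
  induction n with
  | zero => omega
  | succ n ih =>
    intro _
    by_cases hn : n = 0
    · subst hn; simp [pvSt, pow_one]
    · rw [pvSt, ih (by omega), pv_mod_pos, pv_mod_pos, pv_mul_mod_left,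
        mul_assoc, ← pow_succ, pv_mod_pos]

-- splitting the count: first m steps, then k steps from the jumped states
theorem pvCntSpec_split : ∀ (m : Nat) (a b : Int) (k : Nat),
    pvCntSpec a b (m + k) =
      pvCntSpec a b m + pvCntSpec (pvSt a 16807 m) (pvSt b 48271 m) k := by
  intro m
  induction m with
  | zero => intro a b k; simp [pvCntSpec, pvSt]
  | succ m ih =>
    intro a b k
    rw [show m + 1 + k = (m + k) + 1 from by omega]
    simp only [pvCntSpec]
    rw [ih, pvSt_shift, pvSt_shift]
    ring

-- B's recursion computes the structural count
theorem pvCnt_eq_spec : ∀ (n : Nat) (a b : Int), pvCnt a b n = pvCntSpec a b n := by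
  intro n
  induction n using Nat.strong_induction_on with
  | _ n ih =>
    intro a b
    by_cases h0 : n = 0
    · subst h0; simp [pvCnt, pvCntSpec]
    · by_cases h1 : n = 1
      · subst h1; simp [pvCnt, pvCntSpec]
      · rw [pvCnt, if_neg h0, if_neg h1]
        simp only []
        show pvCnt a b (n / 2) + _ = _
        have hh1 : 1 ≤ n / 2 := by omega
        have hjA : PySem.Int.mod (a * PySem.Int.mod ((16807 : Int) ^ (n / 2)) 2147483647) 2147483647
            = pvSt a 16807 (n / 2) := by
          rw [pvSt_pow a 16807 (n / 2) hh1, pv_mod_pos, pv_mod_pos, pv_mod_pos,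
            pv_mul_mod_right]
        have hjB : PySem.Int.mod (b * PySem.Int.mod ((48271 : Int) ^ (n / 2)) 2147483647) 2147483647
            = pvSt b 48271 (n / 2) := by
          rw [pvSt_pow b 48271 (n / 2) hh1, pv_mod_pos, pv_mod_pos, pv_mod_pos,
            pv_mul_mod_right]
        rw [ih (n / 2) (by omega), hjA, hjB, ih (n - n / 2) (by omega),
          ← pvCntSpec_split, Nat.add_sub_cancel' (by omega)]

-- a foldl that ignores the list elements only iterates the step
theorem pv_foldl_const {α β : Type} (g : α → α) :
    ∀ (l : List β) (s : α), l.foldl (fun s _ => g s) s = g^[l.length] s := by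
  intro l
  induction l with
  | nil => intro s; simp
  | cons x xs ih =>
    intro s
    simp [List.foldl_cons, ih, Function.iterate_succ_apply]

-- the count component of n iterations of A's step
theorem pv_iterate_eq_count :
    ∀ (n : Nat) (a b c : Int),
      (pvStepA^[n] (a, b, c)).2.2 = c + pvCntSpec a b n := by
  intro n
  induction n with
  | zero => intro a b c; simp [pvCntSpec]
  | succ n ih =>
    intro a b c
    rw [Function.iterate_succ_apply]
    show (pvStepA^[n] (pvStepA (a, b, c))).2.2 = _
    simp only [pvStepA, pvCntSpec]
    rw [ih]
    split_ifs <;> ring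

-- ===== VERDICT (by name: the statement is the Claim_ definition above) =====
theorem judge_count_spec : Claim_equal_judge_count := by
  intro startA startB iterations _
  show judge_count startA startB iterations = judge_count_alt startA startB iterations
  unfold judge_count judge_count_alt
  rw [pv_foldl_const pvStepA, PySem.List.length_pyRange_one, pv_iterate_eq_count,
    pvCnt_eq_spec]
  simp
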